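-- pv_equiv track=rewrite | github.com/shunbao-p/Deer-flow-s | backend/packages/harness/deerflow/skills/lifecycle_policy.py | _has_prefix_token_overlap
-- ===== SOURCE A (Python) =====
-- def _has_prefix_token_overlap(left: set[str], right: set[str]) -> bool:
--     for left_token in left:
--         for right_token in right:
--             if (
--                 left_token == right_token
--                 or left_token.startswith(right_token)
--                 or right_token.startswith(left_token)
--             ):
--                 return True
--     return False
-- ===== SOURCE B (Python) =====
-- def _has_prefix_token_overlap(left: set[str], right: set[str]) -> bool:
--     # Membership tests against prebuilt sets replace the pairwise scan.
--     left_prefixes = {t[:i] for t in left for i in range(len(t) + 1)}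
--     left_tokens = set(left)
--     for right_token in right:
--         if right_token in left_prefixes:
--             return True
--         if any(right_token[:i] in left_tokens for i in range(len(right_token) + 1)):
--             return True
--     return False
-- ===== Notes on version B (the rewrite author's own statement) =====
-- stated objective: alternative
-- what changed: Replaces the pairwise nested scan with two hash sets built once (all prefixes of left tokens, and the left tokens themselves); each right token is then decided by set-membership tests instead of being compared against every left token.
import Mathlib
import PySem

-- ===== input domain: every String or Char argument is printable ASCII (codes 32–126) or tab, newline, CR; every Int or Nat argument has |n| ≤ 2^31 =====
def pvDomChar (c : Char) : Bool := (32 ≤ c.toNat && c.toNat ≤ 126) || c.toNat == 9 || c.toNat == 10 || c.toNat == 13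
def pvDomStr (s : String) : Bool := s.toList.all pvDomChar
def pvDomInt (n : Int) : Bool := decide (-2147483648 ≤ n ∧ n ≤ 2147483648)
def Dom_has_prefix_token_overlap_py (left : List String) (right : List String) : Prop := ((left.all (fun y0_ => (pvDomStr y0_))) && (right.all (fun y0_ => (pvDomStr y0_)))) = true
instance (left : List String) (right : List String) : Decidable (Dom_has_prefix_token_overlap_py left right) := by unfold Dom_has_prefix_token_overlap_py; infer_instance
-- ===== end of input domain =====

-- ===== PORT A =====
-- B decides the overlap via two prebuilt hash sets (all prefixes of left tokens, and the left tokens) instead of A's pairwise scan.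
def has_prefix_token_overlap_py (left : List String) (right : List String) : Bool :=
  left.any (fun left_token => right.any (fun right_token =>
    left_token == right_token
      || PySem.Str.startswith left_token right_token
      || PySem.Str.startswith right_token left_token))

-- ===== PORT B =====
def has_prefix_token_overlap_py_alt (left : List String) (right : List String) : Bool :=
  let left_prefixes : PySem.Set String :=
    PySem.Set.ofList (left.flatMap (fun t =>
      (PySem.List.pyRange 0 ((PySem.Str.len t : Int) + 1) 1).map
        (fun i => PySem.Str.slice t none (some i))))
  let left_tokens : PySem.Set String := PySem.Set.ofList left
  right.any (fun right_token =>
    PySem.Set.contains left_prefixes right_token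
      || (PySem.List.pyRange 0 ((PySem.Str.len right_token : Int) + 1) 1).any
          (fun i => PySem.Set.contains left_tokens (PySem.Str.slice right_token none (some i))))

-- ===== PRECONDITION & SPEC =====
def Spec_has_prefix_token_overlap_py (left : List String) (right : List String) (out : Bool) : Prop := out = has_prefix_token_overlap_py_alt left right
instance (left : List String) (right : List String) (out : Bool) : Decidable (Spec_has_prefix_token_overlap_py left right out) := by unfold Spec_has_prefix_token_overlap_py; infer_instance

-- ===== CLAIM (what is proved, stated in full; the proofs are below) =====
def Claim_equal_has_prefix_token_overlap_py : Prop := ∀ (left : List String) (right : List String), Dom_has_prefix_token_overlap_py left right → Spec_has_prefix_token_overlap_py left right (has_prefix_token_overlap_py left right)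

-- ===== LEMMAS AND PROOFS =====
lemma cond_iff (l r : String) :
    (l == r || PySem.Str.startswith l r || PySem.Str.startswith r l) = true ↔
      (r.toList <+: l.toList ∨ l.toList <+: r.toList) := by
  simp only [Bool.or_eq_true, beq_iff_eq, PySem.Str.startswith_eq, PySem.Chars.startswith_iff]
  constructor
  · rintro ((h|h)|h)
    · subst h; simp
    · exact .inl h
    · exact .inr h
  · rintro (h|h)
    · exact .inl (.inr h)
    · exact .inr h

lemma prefix_iff_slice (r t : String) :
    r.toList <+: t.toList ↔
      ∃ i ∈ PySem.List.pyRange 0 ((PySem.Str.len t : Int) + 1) 1,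
        r = PySem.Str.slice t none (some i) := by
  have sl : ∀ (i : Int), 0 ≤ i →
      (PySem.Str.slice t none (some i)).toList = t.toList.take i.toNat := by
    intro i h; simp [PySem.List.slice_to _ h]
  simp only [PySem.List.mem_pyRange_one, PySem.Str.len_eq]
  constructor
  · intro h
    refine ⟨(r.toList.length : Int), ⟨by omega, by have := h.length_le; omega⟩, ?_⟩
    rw [← String.toList_inj, sl _ (by omega)]
    simpa using List.prefix_iff_eq_take.mp h
  · rintro ⟨i, ⟨h0, hi⟩, rfl⟩
    rw [List.prefix_iff_eq_take, sl _ h0]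
    simp [inf_of_le_left, List.length_take]

-- ===== VERDICT (by name: the statement is the Claim_ definition above) =====
theorem has_prefix_token_overlap_py_spec : Claim_equal_has_prefix_token_overlap_py := by
  intro left right _
  unfold Spec_has_prefix_token_overlap_py has_prefix_token_overlap_py has_prefix_token_overlap_py_alt
  rw [Bool.eq_iff_iff]
  simp only [List.any_eq_true, cond_iff]
  simp only [List.any_eq_true, Bool.or_eq_true, PySem.Set.contains_iff, PySem.Set.mem_ofList,
    List.mem_flatMap, List.mem_map]
  constructor
  · rintro ⟨l, hl, r, hr, h | h⟩
    · refine ⟨r, hr, .inl ?_⟩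
      obtain ⟨i, hi, rfl⟩ := (prefix_iff_slice r l).mp h
      exact ⟨l, hl, i, hi, rfl⟩
    · refine ⟨r, hr, .inr ?_⟩
      obtain ⟨i, hi, rfl⟩ := (prefix_iff_slice l r).mp h
      exact ⟨i, hi, hl⟩
  · rintro ⟨r, hr, ⟨t, ht, i, hi, hri⟩ | ⟨i, hi, hmem⟩⟩
    · exact ⟨t, ht, r, hr, .inl ((prefix_iff_slice r t).mpr ⟨i, hi, hri.symm⟩)⟩
    · exact ⟨_, hmem, r, hr, .inr ((prefix_iff_slice _ r).mpr ⟨i, hi, rfl⟩)⟩
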